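-- pv_equiv track=rewrite | github.com/ArtyomKolosov2/PL_labs | lab24/task_oaip.py | count_spaces
-- ===== SOURCE A (Python) =====
-- def count_spaces(my_text):
--     if not isinstance(my_text, str):
--         return None
--     count = 0
--     for i in range(len(my_text)):
--         if my_text[i].isspace():
--             flag = False
--             for j in range(i + 1, len(my_text)):
--                 if my_text[j].isalpha():
--                     flag = True
--                 elif my_text[j].isspace():
--                     if flag:
--                         count += 1
--                         i += j
--                     break
--                 elif my_text[j] in (",", ".", "?", ":", ";", "/"):
--                     i += j
--                     break
--     return count
-- ===== SOURCE B (Python) =====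
-- def count_spaces(my_text):
--     # One backward pass: maintain, for the suffix already seen, whether a scan
--     # starting there with flag False (rf) or True (rt) would reach a space-terminator
--     # with an alpha seen; count each space whose following scan succeeds.
--     if not isinstance(my_text, str):
--         return None
--     punct = (",", ".", "?", ":", ";", "/")
--     rf = rt = False
--     count = 0
--     for ch in reversed(my_text):
--         if ch.isspace():
--             if rf:
--                 count += 1
--             rf, rt = False, True
--         elif ch in punct:
--             rf = rt = False
--         elif ch.isalpha():
--             rf = rt
--     return count
-- ===== Notes on version B (the rewrite author's own statement) =====
-- stated objective: alternative
-- what changed: Replaced the forward scan with a nested rescan from every space by one reverse pass that carries two booleans (would a scan starting here with flag False/True hit a space-terminator after an alpha), counting each space from the already-computed suffix state; worst-case O(n) vs A's O(n^2), though on typical text A's inner scans are short so no measured speed-up.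
import Mathlib
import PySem

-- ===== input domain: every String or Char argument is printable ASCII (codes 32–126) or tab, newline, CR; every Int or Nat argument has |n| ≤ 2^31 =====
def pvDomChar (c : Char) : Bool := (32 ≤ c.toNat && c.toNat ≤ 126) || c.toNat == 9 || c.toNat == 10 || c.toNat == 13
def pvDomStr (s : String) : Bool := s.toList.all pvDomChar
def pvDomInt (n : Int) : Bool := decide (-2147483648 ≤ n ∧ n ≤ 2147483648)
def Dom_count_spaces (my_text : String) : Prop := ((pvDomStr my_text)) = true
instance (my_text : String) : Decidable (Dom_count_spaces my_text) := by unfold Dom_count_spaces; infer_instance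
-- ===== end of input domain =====

-- B replaces A's nested rescan-from-every-space with one reverse pass carrying two booleans (objective: alternative single-pass algorithm).

-- ===== PORT A =====
-- inner loop 'for j in range(i+1, len)': returns whether 'count += 1' fires
-- (the Python 'i += j' writes to the for-loop variable, which range() overwrites: dead code, not ported)
def aInner (cs : List Char) (j : Nat) (flag : Bool) : Bool :=
  if h : j < cs.length then
    if PySem.Chars.isalpha cs[j] then aInner cs (j + 1) true
    else if PySem.Chars.isspace cs[j] then flag
    else if cs[j] = ',' ∨ cs[j] = '.' ∨ cs[j] = '?' ∨ cs[j] = ':' ∨ cs[j] = ';' ∨ cs[j] = '/' then false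
    else aInner cs (j + 1) flag
  else false
termination_by cs.length - j

-- outer loop 'for i in range(len(my_text))' with accumulator count
def aOuter (cs : List Char) (i : Nat) (count : Int) : Int :=
  if h : i < cs.length then
    aOuter cs (i + 1)
      (if PySem.Chars.isspace cs[i] then (if aInner cs (i + 1) false then count + 1 else count) else count)
  else count
termination_by cs.length - i

def count_spaces (my_text : String) : Int := aOuter my_text.toList 0 0

-- ===== PORT B =====
-- loop body of B: state (count, rf, rt)
def bStep (st : Int × Bool × Bool) (c : Char) : Int × Bool × Bool :=
  if PySem.Chars.isspace c then ((if st.2.1 then st.1 + 1 else st.1), false, true)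
  else if c = ',' ∨ c = '.' ∨ c = '?' ∨ c = ':' ∨ c = ';' ∨ c = '/' then (st.1, false, false)
  else if PySem.Chars.isalpha c then (st.1, st.2.2, st.2.2)
  else st

def count_spaces_alt (my_text : String) : Int :=
  (my_text.toList.reverse.foldl bStep (0, false, false)).1

-- ===== PRECONDITION & SPEC =====
def Spec_count_spaces (my_text : String) (out : Int) : Prop := out = count_spaces_alt my_text
instance (my_text : String) (out : Int) : Decidable (Spec_count_spaces my_text out) := by unfold Spec_count_spaces; infer_instance

-- ===== CLAIM (what is proved, stated in full; the proofs are below) =====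
def Claim_equal_count_spaces : Prop := ∀ (my_text : String), Dom_count_spaces my_text → Spec_count_spaces my_text (count_spaces my_text)

-- ===== LEMMAS AND PROOFS =====

-- structural (suffix-list) reformulation of A's inner loop
def innerL : List Char → Bool → Bool
  | [], _ => false
  | c :: rest, flag =>
    if PySem.Chars.isalpha c then innerL rest true
    else if PySem.Chars.isspace c then flag
    else if c = ',' ∨ c = '.' ∨ c = '?' ∨ c = ':' ∨ c = ';' ∨ c = '/' then false
    else innerL rest flag

-- structural reformulation of A's outer loop
def countL : List Char → Int
  | [] => 0
  | c :: rest => (if PySem.Chars.isspace c then (if innerL rest false then 1 else 0) else 0) + countL rest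

theorem space_not_alpha (c : Char) (h : PySem.Chars.isspace c = true) : PySem.Chars.isalpha c = false := by
  have hA : 'A'.val.toNat = 65 := by decide
  have hZ : 'Z'.val.toNat = 90 := by decide
  have ha : 'a'.val.toNat = 97 := by decide
  have hz : 'z'.val.toNat = 122 := by decide
  simp only [PySem.Chars.isspace, PySem.Chars.isalpha, PySem.Chars.isupper, PySem.Chars.islower,
    Char.le_def, UInt32.le_iff_toNat_le, Char.toNat, decide_eq_true_eq, Bool.or_eq_true,
    Bool.and_eq_true, Bool.or_eq_false_iff, Bool.and_eq_false_iff, decide_eq_false_iff_not,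
    hA, hZ, ha, hz] at *
  omega

theorem punct_not_alpha (c : Char)
    (h : c = ',' ∨ c = '.' ∨ c = '?' ∨ c = ':' ∨ c = ';' ∨ c = '/') :
    PySem.Chars.isalpha c = false ∧ PySem.Chars.isspace c = false := by
  rcases h with h | h | h | h | h | h <;> subst h <;> exact ⟨by decide, by decide⟩

theorem aInner_eq_innerL (cs : List Char) (j : Nat) (flag : Bool) :
    aInner cs j flag = innerL (cs.drop j) flag := by
  by_cases h : j < cs.length
  · have hd : cs.drop j = cs[j] :: cs.drop (j + 1) := List.drop_eq_getElem_cons h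
    rw [aInner, hd, innerL]
    simp only [h, dif_pos]
    split
    · exact aInner_eq_innerL cs (j + 1) true
    · split
      · rfl
      · split
        · rfl
        · exact aInner_eq_innerL cs (j + 1) flag
  · rw [aInner, List.drop_eq_nil_of_le (by omega)]
    simp [h, innerL]
termination_by cs.length - j

theorem aOuter_eq_countL (cs : List Char) (i : Nat) (count : Int) :
    aOuter cs i count = count + countL (cs.drop i) := by
  by_cases h : i < cs.length
  · have hd : cs.drop i = cs[i] :: cs.drop (i + 1) := List.drop_eq_getElem_cons h
    rw [aOuter, hd, countL]
    simp only [h, dif_pos]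
    rw [aOuter_eq_countL cs (i + 1), aInner_eq_innerL]
    split
    · split <;> ring
    · ring
  · rw [aOuter, List.drop_eq_nil_of_le (by omega)]
    simp [h, countL]
termination_by cs.length - i

theorem foldr_bStep (cs : List Char) :
    cs.foldr (fun c st => bStep st c) ((0 : Int), false, false)
      = (countL cs, innerL cs false, innerL cs true) := by
  induction cs with
  | nil => simp [countL, innerL]
  | cons c rest ih =>
    rw [List.foldr_cons, ih, bStep]
    by_cases hs : PySem.Chars.isspace c = true
    · have ha := space_not_alpha c hs
      simp only [hs, ha, countL, innerL, Bool.false_eq_true, if_false, if_true, Prod.mk.injEq,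
        and_true]
      split <;> ring
    · have hs' : PySem.Chars.isspace c = false := by simpa using hs
      by_cases hp : c = ',' ∨ c = '.' ∨ c = '?' ∨ c = ':' ∨ c = ';' ∨ c = '/'
      · obtain ⟨ha, -⟩ := punct_not_alpha c hp
        simp [hp, countL, innerL, ha, hs']
      · by_cases hal : PySem.Chars.isalpha c = true
        · simp [hs', hp, hal, countL, innerL]
        · simp [hs', hp, hal, countL, innerL]

-- ===== VERDICT (by name: the statement is the Claim_ definition above) =====
theorem count_spaces_spec : Claim_equal_count_spaces := by
  intro s _
  unfold Spec_count_spaces count_spaces count_spaces_alt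
  rw [List.foldl_reverse]
  have h2 : (s.toList.foldr (fun c st => bStep st c) ((0 : Int), false, false))
      = (countL s.toList, innerL s.toList false, innerL s.toList true) := foldr_bStep s.toList
  rw [h2, aOuter_eq_countL]
  simp
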